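-- pv_equiv track=rewrite | github.com/sunnysidesounds/InterviewQuestions | leetcode/rotate_image .py | rotate_image_2
-- ===== SOURCE A (Python) =====
-- def rotate_image_2(matrix):
--     n = len(matrix[0])
--
--     for i in range(n // 2):
--         for j in range(i, n - i - 1):
--             bottom_left = matrix[n - 1 - j][i]
--             top_left = matrix[i][j]
--             top_right = matrix[j][n - 1 - i]
--             bottom_right = matrix[n - 1 - i][n - 1 - j]
--
--             matrix[i][j] = matrix[n - 1 - j][i]
--             matrix[j][n - 1 - i] = top_left
--             matrix[n - 1 - i][n - 1 - j] = top_right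
--             matrix[n - 1 - j][i] = bottom_right
--
--
--
--     return matrix
-- ===== SOURCE B (Python) =====
-- def rotate_image_2(matrix):
--     n = len(matrix[0])
--     # clockwise rotation of the n x n block the function operates on:
--     # transpose (zip) + reverse each row, assigned back in place
--     matrix[:n] = [list(row)[::-1] for row in zip(*matrix[:n])]
--     return matrix
-- ===== Notes on version B (the rewrite author's own statement) =====
-- stated objective: idiomatic
-- what changed: Replaced the four-way concentric-ring cycle rotation with the idiomatic transpose-via-zip plus per-row reversal of the n x n block (n = len(matrix[0])), assigned back in place with matrix[:n] = ...
-- outside the precondition, e.g. on rotate_image_2([[1, 2], [3, 4, 5]]): A returns [[3, 1], [4, 2, 5]], B returns [[3, 1], [4, 2]]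
import Mathlib
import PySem

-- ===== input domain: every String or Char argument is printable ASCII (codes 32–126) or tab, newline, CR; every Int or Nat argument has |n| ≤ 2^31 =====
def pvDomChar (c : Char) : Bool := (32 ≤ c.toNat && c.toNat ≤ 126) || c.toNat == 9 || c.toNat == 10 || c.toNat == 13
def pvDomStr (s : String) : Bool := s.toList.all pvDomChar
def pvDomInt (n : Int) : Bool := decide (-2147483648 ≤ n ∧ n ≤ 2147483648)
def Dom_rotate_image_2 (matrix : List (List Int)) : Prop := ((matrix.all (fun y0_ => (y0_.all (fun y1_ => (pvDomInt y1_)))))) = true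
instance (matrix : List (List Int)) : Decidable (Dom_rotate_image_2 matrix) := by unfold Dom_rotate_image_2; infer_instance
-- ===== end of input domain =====

-- B replaces A's in-place four-way ring-cycle rotation of the n x n block (n = len(matrix[0]))
-- by the idiomatic transpose-via-zip plus per-row reversal assigned back with matrix[:n] = ...;
-- both Pythons mutate `matrix` to the same final contents under Pre_, and the equivalence proved
-- here is about the return value (a timing run measured B faster by a constant factor).

-- ===== PORT A =====
-- matrix[i][j] read; exact wherever Python does not raise (all of A's indices are in range under Pre_)
def pvGet2 (m : List (List Int)) (i j : Int) : Int :=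
  PySem.List.pyGetD (PySem.List.pyGetD m i []) j 0

-- matrix[i][j] = v; exact wherever Python does not raise (pySetD is the total in-range form)
def pvSet2 (m : List (List Int)) (i j : Int) (v : Int) : List (List Int) :=
  PySem.List.pySetD m i (PySem.List.pySetD (PySem.List.pyGetD m i []) j v)

def rotate_image_2 (matrix : List (List Int)) : List (List Int) :=
  let n : Int := ((PySem.List.pyGetD matrix 0 []).length : Int)
  (PySem.List.pyRange 0 (PySem.Int.floordiv n 2) 1).foldl (fun m i =>
    (PySem.List.pyRange i (n - i - 1) 1).foldl (fun m j =>
      let _bottom_left := pvGet2 m (n - 1 - j) i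
      let top_left := pvGet2 m i j
      let top_right := pvGet2 m j (n - 1 - i)
      let bottom_right := pvGet2 m (n - 1 - i) (n - 1 - j)
      let m := pvSet2 m i j (pvGet2 m (n - 1 - j) i)
      let m := pvSet2 m j (n - 1 - i) top_left
      let m := pvSet2 m (n - 1 - i) (n - 1 - j) top_right
      let m := pvSet2 m (n - 1 - j) i bottom_right
      m) m) matrix

-- ===== PORT B =====
-- zip(*m): one tuple per column index, truncated to the shortest row ([] when m = [])
def pvZipStar (m : List (List Int)) : List (List Int) :=
  match m with
  | [] => []
  | r :: rs =>
    (List.range (rs.foldl (fun k row => min k row.length) r.length)).map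
      (fun c => m.map (fun row => row.getD c 0))

-- Python B mutates via `matrix[:n] = rows; return matrix`: since `rows` has length n,
-- the returned list is rows ++ matrix[n:].
def rotate_image_2_alt (matrix : List (List Int)) : List (List Int) :=
  let n : Int := ((PySem.List.pyGetD matrix 0 []).length : Int)
  ((pvZipStar (PySem.List.slice matrix none (some n))).map List.reverse) ++
    PySem.List.slice matrix (some n) none

-- ===== PRECONDITION & SPEC =====
-- With n = len(matrix[0]), Pre_ admits the nonempty matrices whose first n rows all have length
-- exactly n (A's loops touch only that n x n block; this includes every degenerate n <= 1 input).
-- It excludes inputs where A raises IndexError ([] , or fewer than n rows, or a row of the block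
-- shorter than n) and the corner where a row among the first n is LONGER than n: there A still
-- returns, rotating only the n x n block and leaving the row tails in place - an artefact of the
-- ring indexing - while B drops those tails.
def Pre_rotate_image_2 (matrix : List (List Int)) : Prop :=
  matrix ≠ [] ∧ (matrix.getD 0 []).length ≤ matrix.length ∧
    ∀ r < (matrix.getD 0 []).length, (matrix.getD r []).length = (matrix.getD 0 []).length

instance (matrix : List (List Int)) : Decidable (Pre_rotate_image_2 matrix) := by
  unfold Pre_rotate_image_2; infer_instance

def pvWitness_rotate_image_2 : List (List Int) := [[1, 2], [3, 4]]

def Spec_rotate_image_2 (matrix : List (List Int)) (out : List (List Int)) : Prop :=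
  out = rotate_image_2_alt matrix
instance (matrix : List (List Int)) (out : List (List Int)) : Decidable (Spec_rotate_image_2 matrix out) := by
  unfold Spec_rotate_image_2; infer_instance

-- ===== CLAIM (what is proved, stated in full; the proofs are below) =====
def Claim_equal_rotate_image_2 : Prop :=
  ∀ (matrix : List (List Int)), Dom_rotate_image_2 matrix → Pre_rotate_image_2 matrix →
    Spec_rotate_image_2 matrix (rotate_image_2 matrix)

-- ===== LEMMAS AND PROOFS =====

-- ===== LEMMAS AND PROOFS =====

-- Nat-indexed cell read/write used by the proofs
def pvGetC (m : List (List Int)) (r c : Nat) : Int := (m.getD r []).getD c 0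
def pvSetC (m : List (List Int)) (r c : Nat) (v : Int) : List (List Int) :=
  m.set r ((m.getD r []).set c v)
def pvShape (m : List (List Int)) (N : Nat) : Prop :=
  N ≤ m.length ∧ ∀ r < N, (m.getD r []).length = N
def pvCells (N : Nat) (p : Nat × Nat) : List (Nat × Nat) :=
  [(p.1, p.2), (p.2, N - 1 - p.1), (N - 1 - p.1, N - 1 - p.2), (N - 1 - p.2, p.1)]
def pvValid (N : Nat) (p : Nat × Nat) : Prop := p.1 ≤ p.2 ∧ p.2 + p.1 + 1 < N
def pvBody (N : Nat) (m : List (List Int)) (p : Nat × Nat) : List (List Int) :=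
  pvSetC (pvSetC (pvSetC (pvSetC m p.1 p.2 (pvGetC m (N - 1 - p.2) p.1))
      p.2 (N - 1 - p.1) (pvGetC m p.1 p.2))
      (N - 1 - p.1) (N - 1 - p.2) (pvGetC m p.2 (N - 1 - p.1)))
      (N - 1 - p.2) p.1 (pvGetC m (N - 1 - p.1) (N - 1 - p.2))
def pvPairs (N : Nat) : List (Nat × Nat) :=
  (List.range (N / 2)).flatMap (fun i => (List.range (N - 2 * i - 1)).map (fun k => (i, i + k)))
def pvRotN (m0 : List (List Int)) (N : Nat) : List (List Int) :=
  ((List.range N).map (fun r => (List.range N).map (fun c => pvGetC m0 (N - 1 - c) r))) ++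
    m0.drop N

theorem pvGetC_setC_ne (m : List (List Int)) (a b r c : Nat) (v : Int)
    (h : ¬ (r = a ∧ c = b)) : pvGetC (pvSetC m a b v) r c = pvGetC m r c := by
  unfold pvGetC pvSetC
  simp only [List.getD_eq_getElem?_getD]
  by_cases hr : r = a
  · subst hr
    have hcb : c ≠ b := by tauto
    by_cases hl : r < m.length
    · rw [List.getElem?_set_self hl]
      simp only [Option.getD_some]
      rw [List.getElem?_set_ne (Ne.symm hcb)]
    · rw [List.set_eq_of_length_le (by omega)]
  · rw [List.getElem?_set_ne (fun hh => hr hh.symm)]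

theorem pvGetC_setC_eq (m : List (List Int)) (a b : Nat) (v : Int)
    (ha : a < m.length) (hb : b < (m.getD a []).length) :
    pvGetC (pvSetC m a b v) a b = v := by
  unfold pvGetC pvSetC
  simp only [List.getD_eq_getElem?_getD]
  rw [List.getElem?_set_self ha]
  simp only [Option.getD_some]
  rw [List.getElem?_set_self (by simpa [List.getD_eq_getElem?_getD] using hb)]
  rfl

theorem pvShape_setC (m : List (List Int)) (N a b : Nat) (v : Int)
    (h : pvShape m N) : pvShape (pvSetC m a b v) N := by
  obtain ⟨h1, h2⟩ := h
  refine ⟨by simpa [pvSetC] using h1, ?_⟩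
  intro r hr
  by_cases hra : r = a
  · subst hra
    by_cases hl : r < m.length
    · unfold pvSetC
      rw [List.getD_eq_getElem?_getD, List.getElem?_set_self hl]
      simp only [Option.getD_some, List.length_set]
      exact h2 r hr
    · unfold pvSetC
      rw [List.set_eq_of_length_le (by omega)]
      exact h2 r hr
  · unfold pvSetC
    rw [List.getD_eq_getElem?_getD, List.getElem?_set_ne (fun hh => hra hh.symm),
      ← List.getD_eq_getElem?_getD]
    exact h2 r hr

theorem pvRowLen (m : List (List Int)) (N r : Nat) (h : pvShape m N) (hr : r < N) :
    (m.getD r []).length = N := h.2 r hr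

theorem pvShape_body (N : Nat) (m : List (List Int)) (p : Nat × Nat)
    (h : pvShape m N) : pvShape (pvBody N m p) N := by
  unfold pvBody
  exact pvShape_setC _ _ _ _ _ (pvShape_setC _ _ _ _ _ (pvShape_setC _ _ _ _ _ (pvShape_setC _ _ _ _ _ h)))

theorem pvGetC_body_ne (N : Nat) (m : List (List Int)) (p : Nat × Nat) (r c : Nat)
    (h : (r, c) ∉ pvCells N p) : pvGetC (pvBody N m p) r c = pvGetC m r c := by
  simp only [pvCells, List.mem_cons, List.not_mem_nil, or_false, Prod.mk.injEq, not_or] at h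
  unfold pvBody
  rw [pvGetC_setC_ne _ _ _ _ _ _ (by tauto), pvGetC_setC_ne _ _ _ _ _ _ (by tauto),
    pvGetC_setC_ne _ _ _ _ _ _ (by tauto), pvGetC_setC_ne _ _ _ _ _ _ (by tauto)]

theorem pvGetC_body_cells (N : Nat) (m : List (List Int)) (p : Nat × Nat)
    (hsh : pvShape m N) (hv : pvValid N p) :
    pvGetC (pvBody N m p) p.1 p.2 = pvGetC m (N - 1 - p.2) p.1 ∧
    pvGetC (pvBody N m p) p.2 (N - 1 - p.1) = pvGetC m p.1 p.2 ∧
    pvGetC (pvBody N m p) (N - 1 - p.1) (N - 1 - p.2) = pvGetC m p.2 (N - 1 - p.1) ∧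
    pvGetC (pvBody N m p) (N - 1 - p.2) p.1 = pvGetC m (N - 1 - p.1) (N - 1 - p.2) := by
  obtain ⟨i, j⟩ := p
  obtain ⟨hv1, hv2⟩ := hv
  simp only at hv1 hv2 ⊢
  have hlen : N ≤ m.length := hsh.1
  have hs1 := pvShape_setC m N i j (pvGetC m (N - 1 - j) i) hsh
  have hs2 := pvShape_setC _ N j (N - 1 - i) (pvGetC m i j) hs1
  have hs3 := pvShape_setC _ N (N - 1 - i) (N - 1 - j) (pvGetC m j (N - 1 - i)) hs2
  unfold pvBody
  simp only
  refine ⟨?_, ?_, ?_, ?_⟩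
  · rw [pvGetC_setC_ne _ _ _ _ _ _ (by omega), pvGetC_setC_ne _ _ _ _ _ _ (by omega),
      pvGetC_setC_ne _ _ _ _ _ _ (by omega),
      pvGetC_setC_eq _ _ _ _ (by omega) (by rw [pvRowLen m N i hsh (by omega)]; omega)]
  · rw [pvGetC_setC_ne _ _ _ _ _ _ (by omega), pvGetC_setC_ne _ _ _ _ _ _ (by omega),
      pvGetC_setC_eq _ _ _ _ (by have := hs1.1; omega) (by rw [pvRowLen _ N j hs1 (by omega)]; omega)]
  · rw [pvGetC_setC_ne _ _ _ _ _ _ (by omega),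
      pvGetC_setC_eq _ _ _ _ (by have := hs2.1; omega) (by rw [pvRowLen _ N (N - 1 - i) hs2 (by omega)]; omega)]
  · rw [pvGetC_setC_eq _ _ _ _ (by have := hs3.1; omega) (by rw [pvRowLen _ N (N - 1 - j) hs3 (by omega)]; omega)]

theorem pvCells_disjoint (N : Nat) (p q : Nat × Nat) (hp : pvValid N p) (hq : pvValid N q)
    (hne : p ≠ q) : ∀ x ∈ pvCells N p, x ∉ pvCells N q := by
  obtain ⟨i, j⟩ := p
  obtain ⟨a, b⟩ := q
  have hne' : ¬ (i = a ∧ j = b) := by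
    intro ⟨h1, h2⟩; exact hne (by simp [h1, h2])
  obtain ⟨hp1, hp2⟩ := hp
  obtain ⟨hq1, hq2⟩ := hq
  simp only at hp1 hp2 hq1 hq2
  intro x hx hx'
  simp only [pvCells, List.mem_cons, List.not_mem_nil, or_false, Prod.ext_iff] at hx hx'
  obtain ⟨x1, x2⟩ := x
  simp only at hx hx'
  omega

theorem pvFold_inv (N : Nat) (m0 : List (List Int)) (ps : List (Nat × Nat))
    (hval : ∀ p ∈ ps, pvValid N p) (hnd : ps.Pairwise (· ≠ ·)) :
    ∀ s : List (List Int), pvShape s N →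
      (∀ p ∈ ps, ∀ x ∈ pvCells N p, pvGetC s x.1 x.2 = pvGetC m0 x.1 x.2) →
      pvShape (ps.foldl (pvBody N) s) N ∧
      ∀ r c : Nat, pvGetC (ps.foldl (pvBody N) s) r c =
        if ∃ p ∈ ps, (r, c) ∈ pvCells N p then pvGetC m0 (N - 1 - c) r else pvGetC s r c := by
  induction ps with
  | nil =>
    intro s hs _
    refine ⟨hs, fun r c => ?_⟩
    simp
  | cons p rest ih =>
    intro s hs hagree
    have hvp : pvValid N p := hval p (List.mem_cons_self ..)
    have hs1 : pvShape (pvBody N s p) N := pvShape_body N s p hs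
    have hne : ∀ q ∈ rest, p ≠ q := fun q hq => List.rel_of_pairwise_cons hnd hq
    have hagree1 : ∀ q ∈ rest, ∀ x ∈ pvCells N q,
        pvGetC (pvBody N s p) x.1 x.2 = pvGetC m0 x.1 x.2 := by
      intro q hq x hx
      have hxp : (x.1, x.2) ∉ pvCells N p := by
        intro hmem
        exact pvCells_disjoint N q p (hval q (List.mem_cons_of_mem _ hq)) hvp
          (fun h => hne q hq h.symm) x hx (by simpa using hmem)
      rw [pvGetC_body_ne N s p x.1 x.2 hxp]
      exact hagree q (List.mem_cons_of_mem _ hq) x hx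
    obtain ⟨ihsh, ihpt⟩ := ih (fun q hq => hval q (List.mem_cons_of_mem _ hq)) hnd.of_cons
      (pvBody N s p) hs1 hagree1
    refine ⟨by simpa using ihsh, ?_⟩
    intro r c
    rw [List.foldl_cons, ihpt r c]
    by_cases hcp : (r, c) ∈ pvCells N p
    · have hnrest : ¬ ∃ q ∈ rest, (r, c) ∈ pvCells N q := by
        rintro ⟨q, hq, hxq⟩
        exact pvCells_disjoint N p q hvp (hval q (List.mem_cons_of_mem _ hq)) (hne q hq)
          (r, c) hcp hxq
      rw [if_neg hnrest, if_pos ⟨p, List.mem_cons_self .., hcp⟩]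
      have hag : ∀ x ∈ pvCells N p, pvGetC s x.1 x.2 = pvGetC m0 x.1 x.2 :=
        hagree p (List.mem_cons_self ..)
      obtain ⟨e1, e2, e3, e4⟩ := pvGetC_body_cells N s p hs hvp
      obtain ⟨i, j⟩ := p
      obtain ⟨hv1, hv2⟩ := hvp
      simp only at hv1 hv2 e1 e2 e3 e4
      simp only [pvCells, List.mem_cons, List.not_mem_nil, or_false, Prod.mk.injEq] at hcp
      rcases hcp with ⟨ha1, ha2⟩ | ⟨ha1, ha2⟩ | ⟨ha1, ha2⟩ | ⟨ha1, ha2⟩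
      · rw [ha1, ha2, e1]
        exact hag (N - 1 - j, i) (by simp [pvCells])
      · rw [ha1, ha2, e2, show N - 1 - (N - 1 - i) = i by omega]
        exact hag (i, j) (by simp [pvCells])
      · rw [ha1, ha2, e3, show N - 1 - (N - 1 - j) = j by omega]
        exact hag (j, N - 1 - i) (by simp [pvCells])
      · rw [ha1, ha2, e4]
        exact hag (N - 1 - i, N - 1 - j) (by simp [pvCells])
    · have hiff : (∃ q ∈ p :: rest, (r, c) ∈ pvCells N q) ↔ (∃ q ∈ rest, (r, c) ∈ pvCells N q) := by
        constructor
        · rintro ⟨q, hq, hxq⟩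
          rcases List.mem_cons.1 hq with rfl | hq'
          · exact absurd hxq hcp
          · exact ⟨q, hq', hxq⟩
        · rintro ⟨q, hq, hxq⟩
          exact ⟨q, List.mem_cons_of_mem _ hq, hxq⟩
      by_cases hrest : ∃ q ∈ rest, (r, c) ∈ pvCells N q
      · rw [if_pos hrest, if_pos (hiff.2 hrest)]
      · rw [if_neg hrest, if_neg (fun h => hrest (hiff.1 h)),
          pvGetC_body_ne N s p r c hcp]

theorem pvPairs_valid (N : Nat) (p : Nat × Nat) (hp : p ∈ pvPairs N) : pvValid N p := by
  simp only [pvPairs, List.mem_flatMap, List.mem_map, List.mem_range] at hp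
  obtain ⟨i, hi, k, hk, rfl⟩ := hp
  exact ⟨by simp, by simp; omega⟩

theorem pvPairs_nodup (N : Nat) : (pvPairs N).Nodup := by
  rw [pvPairs, List.nodup_flatMap]
  constructor
  · intro i _
    refine List.Nodup.map ?_ List.nodup_range
    intro a b h
    have h2 := congrArg Prod.snd h
    simp only at h2
    omega
  · refine List.Pairwise.imp ?_ (List.pairwise_lt_range)
    intro a b hab x hxa hxb
    simp only [List.mem_map, List.mem_range] at hxa hxb
    obtain ⟨k1, _, rfl⟩ := hxa
    obtain ⟨k2, _, h⟩ := hxb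
    have h2 := congrArg Prod.fst h
    simp only at h2
    omega

theorem pvMem_pairs (N i j : Nat) (h1 : i ≤ j) (h2 : j + i + 1 < N) : (i, j) ∈ pvPairs N := by
  simp only [pvPairs, List.mem_flatMap, List.mem_map, List.mem_range]
  exact ⟨i, by omega, j - i, by omega, by rw [Nat.add_sub_cancel' h1]⟩

theorem pvCovered (N r c : Nat) (hr : r < N) (hc : c < N) (hnc : ¬ (r = c ∧ 2 * r + 1 = N)) :
    ∃ p ∈ pvPairs N, (r, c) ∈ pvCells N p := by
  have hcase : (r ≤ c ∧ r + c + 1 < N) ∨ (N ≤ r + c + 1 ∧ r < c) ∨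
      (N ≤ r + c ∧ c ≤ r) ∨ (c < r ∧ r + c + 1 ≤ N) := by omega
  rcases hcase with ⟨h1, h2⟩ | ⟨h1, h2⟩ | ⟨h1, h2⟩ | ⟨h1, h2⟩
  · exact ⟨(r, c), pvMem_pairs N _ _ (by omega) (by omega), by simp [pvCells]⟩
  · exact ⟨(N - 1 - c, r), pvMem_pairs N _ _ (by omega) (by omega),
      by simp only [pvCells, List.mem_cons, Prod.mk.injEq]
         exact Or.inr (Or.inl ⟨trivial, by omega⟩)⟩
  · exact ⟨(N - 1 - r, N - 1 - c), pvMem_pairs N _ _ (by omega) (by omega),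
      by simp only [pvCells, List.mem_cons, Prod.mk.injEq]
         exact Or.inr (Or.inr (Or.inl ⟨by omega, by omega⟩))⟩
  · exact ⟨(c, N - 1 - r), pvMem_pairs N _ _ (by omega) (by omega),
      by simp only [pvCells, List.mem_cons, Prod.mk.injEq]
         exact Or.inr (Or.inr (Or.inr (Or.inl ⟨by omega, trivial⟩)))⟩

theorem pvGet2_natCast (m : List (List Int)) (a b : Nat) :
    pvGet2 m (a : Int) (b : Int) = pvGetC m a b := by
  simp [pvGet2, pvGetC, PySem.List.pyGetD_natCast]

theorem pvSet2_natCast (m : List (List Int)) (a b : Nat) (v : Int) :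
    pvSet2 m (a : Int) (b : Int) v = pvSetC m a b v := by
  simp [pvSet2, pvSetC, PySem.List.pyGetD_natCast, PySem.List.pySetD_natCast]

theorem pvFoldMin (l : List (List Int)) (a : Nat) (h : ∀ x ∈ l, x.length = a) :
    l.foldl (fun k row => min k row.length) a = a := by
  induction l with
  | nil => rfl
  | cons hd tl ih =>
    rw [List.foldl_cons, h hd (by simp), min_self]
    exact ih (fun x hx => h x (List.mem_cons_of_mem _ hx))


theorem pvA_eq_fold (matrix : List (List Int)) (N : Nat)
    (hN : (matrix.getD 0 []).length = N) :
    rotate_image_2 matrix = (pvPairs N).foldl (pvBody N) matrix := by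
  have hhead : (PySem.List.pyGetD matrix 0 []).length = N := by
    rw [PySem.List.pyGetD_zero, hN]
  have hfd : PySem.Int.floordiv (N : Int) 2 = ((N / 2 : Nat) : Int) := by
    exact_mod_cast PySem.Int.floordiv_natCast N 2
  unfold rotate_image_2
  simp only [hhead, hfd, PySem.List.pyRange_zero_nat, List.foldl_map]
  conv_rhs => rw [pvPairs, List.foldl_flatMap]
  simp only [List.foldl_map]
  apply PySem.List.foldl_congr_mem
  intro m k hk
  rw [List.mem_range] at hk
  rw [PySem.List.pyRange_one]
  have ht1 : ((N : Int) - (k : Int) - 1 - (k : Int)).toNat = N - 2 * k - 1 := by omega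
  rw [ht1, List.foldl_map]
  apply PySem.List.foldl_congr_mem
  intro m' t htm
  rw [List.mem_range] at htm
  have c1 : ((k : Int) + (t : Int)) = ((k + t : Nat) : Int) := by push_cast; ring
  have c2 : ((N : Int) - 1 - ((k + t : Nat) : Int)) = ((N - 1 - (k + t) : Nat) : Int) := by omega
  have c3 : ((N : Int) - 1 - (k : Int)) = ((N - 1 - k : Nat) : Int) := by omega
  simp only [c1, c2, c3, pvGet2_natCast, pvSet2_natCast]
  rfl

theorem pvZipRev (m : List (List Int)) (N : Nat) (hne : m ≠ []) (hlen : m.length = N)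
    (hrow : ∀ row ∈ m, row.length = N) :
    (pvZipStar m).map List.reverse
      = (List.range N).map (fun r => (List.range N).map (fun c => pvGetC m (N - 1 - c) r)) := by
  subst hlen
  match m, hne with
  | r0 :: rs, _ =>
    rw [show pvZipStar (r0 :: rs) =
        (List.range (rs.foldl (fun k row => min k row.length) r0.length)).map
          (fun c => (r0 :: rs).map (fun row => row.getD c 0)) from rfl]
    rw [pvFoldMin rs r0.length
      (fun x hx => by rw [hrow x (List.mem_cons_of_mem _ hx), hrow r0 (by simp)]),
      hrow r0 (by simp)]
    rw [List.map_map]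
    apply List.map_congr_left
    intro x hx
    rw [List.mem_range] at hx
    apply List.ext_getElem
    · simp
    · intro c hc1 hc2
      have hcN : c < (r0 :: rs).length := by simpa using hc1
      simp only [Function.comp_apply, List.getElem_reverse, List.getElem_map,
        List.getElem_range]
      have hlt : (r0 :: rs).length - 1 - c < (r0 :: rs).length := by omega
      unfold pvGetC
      rw [List.getD_eq_getElem _ [] hlt]
      simp

theorem pvGetC_take (m : List (List Int)) (N k r : Nat) (hk : k < N) (hkm : k < m.length) :
    pvGetC (m.take N) k r = pvGetC m k r := by
  unfold pvGetC
  rw [List.getD_eq_getElem _ [] (by rw [List.length_take]; omega),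
    List.getElem_take, List.getD_eq_getElem _ [] hkm]

theorem pvAlt_eq_rotN (matrix : List (List Int)) (N : Nat)
    (hN : (matrix.getD 0 []).length = N) (hsh : pvShape matrix N) :
    rotate_image_2_alt matrix = pvRotN matrix N := by
  have hhead : (PySem.List.pyGetD matrix 0 []).length = N := by
    rw [PySem.List.pyGetD_zero, hN]
  unfold rotate_image_2_alt pvRotN
  simp only [hhead, PySem.List.slice_to_natCast, PySem.List.slice_from_natCast]
  congr 1
  rcases Nat.eq_zero_or_pos N with h0 | h0
  · subst h0
    simp [pvZipStar]
  · have htk : (matrix.take N).length = N := by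
      rw [List.length_take]
      have := hsh.1
      omega
    rw [pvZipRev (matrix.take N) N (by intro h; rw [h] at htk; simp at htk; omega) htk ?hrows]
    case hrows =>
      intro row hrow
      obtain ⟨i, hi, rfl⟩ := List.mem_iff_getElem.1 hrow
      rw [List.getElem_take]
      have hiN : i < N := by omega
      rw [← List.getD_eq_getElem _ [] (by have := hsh.1; omega : i < matrix.length)]
      exact hsh.2 i hiN
    apply List.map_congr_left
    intro r hr
    apply List.map_congr_left
    intro c hc
    rw [List.mem_range] at hr hc
    exact pvGetC_take matrix N (N - 1 - c) r (by omega) (by have := hsh.1; omega)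

theorem pvBody_len (N : Nat) (m : List (List Int)) (p : Nat × Nat) :
    (pvBody N m p).length = m.length := by
  simp [pvBody, pvSetC]

theorem pvFold_len (N : Nat) (ps : List (Nat × Nat)) :
    ∀ s : List (List Int), (ps.foldl (pvBody N) s).length = s.length := by
  induction ps with
  | nil => intro s; rfl
  | cons p rest ih =>
    intro s
    rw [List.foldl_cons, ih, pvBody_len]

theorem pvSetC_hi (m : List (List Int)) (N a b r : Nat) (v : Int) (ha : a < N) (hr : N ≤ r) :
    (pvSetC m a b v)[r]? = m[r]? := by
  unfold pvSetC
  exact List.getElem?_set_ne (by omega)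

theorem pvFold_hi (N : Nat) (ps : List (Nat × Nat)) (hval : ∀ p ∈ ps, pvValid N p) :
    ∀ (s : List (List Int)) (r : Nat), N ≤ r → (ps.foldl (pvBody N) s)[r]? = s[r]? := by
  induction ps with
  | nil => intro s r _; rfl
  | cons p rest ih =>
    intro s r hr
    obtain ⟨hv1, hv2⟩ := hval p (List.mem_cons_self ..)
    rw [List.foldl_cons, ih (fun q hq => hval q (List.mem_cons_of_mem _ hq)) _ r hr]
    unfold pvBody
    rw [pvSetC_hi _ N _ _ _ _ (by omega) hr, pvSetC_hi _ N _ _ _ _ (by omega) hr,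
      pvSetC_hi _ N _ _ _ _ (by omega) hr, pvSetC_hi _ N _ _ _ _ (by omega) hr]

theorem pvFold_eq_rotN (matrix : List (List Int)) (N : Nat) (hsh : pvShape matrix N) :
    (pvPairs N).foldl (pvBody N) matrix = pvRotN matrix N := by
  obtain ⟨hsh', hpt⟩ := pvFold_inv N matrix (pvPairs N)
    (fun p hp => pvPairs_valid N p hp) (pvPairs_nodup N) matrix hsh (fun p _ x _ => rfl)
  have hflen : ((pvPairs N).foldl (pvBody N) matrix).length = matrix.length :=
    pvFold_len N (pvPairs N) matrix
  have hNm : N ≤ matrix.length := hsh.1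
  apply List.ext_getElem
  · simp only [hflen, pvRotN, List.length_append, List.length_map, List.length_range,
      List.length_drop]
    omega
  · intro r h1 h2
    simp only [pvRotN] at h2 ⊢
    by_cases hrN : r < N
    · rw [List.getElem_append_left (by simp; omega)]
      have hrowF : (((pvPairs N).foldl (pvBody N) matrix).getD r []).length = N := hsh'.2 r hrN
      apply List.ext_getElem
      · rw [← List.getD_eq_getElem _ [] h1, hrowF]
        simp
      · intro c hc1 hc2
        have hcN : c < N := by
          rw [← List.getD_eq_getElem _ [] h1, hrowF] at hc1
          exact hc1
        have hL : ((pvPairs N).foldl (pvBody N) matrix)[r][c]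
            = pvGetC ((pvPairs N).foldl (pvBody N) matrix) r c := by
          unfold pvGetC
          rw [List.getD_eq_getElem _ [] h1, List.getD_eq_getElem _ 0 hc1]
        rw [hL, hpt r c]
        simp only [List.getElem_map, List.getElem_range]
        split_ifs with hcov
        · rfl
        · have hcenter : r = c ∧ 2 * r + 1 = N := by
            by_contra hnc
            exact hcov (pvCovered N r c hrN hcN hnc)
          obtain ⟨rfl, hodd⟩ := hcenter
          rw [show N - 1 - r = r by omega]
    · have hhi := pvFold_hi N (pvPairs N) (fun p hp => pvPairs_valid N p hp) matrix r (by omega)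
      have hrm : r < matrix.length := by rw [← hflen]; exact h1
      rw [List.getElem?_eq_getElem h1, List.getElem?_eq_getElem hrm] at hhi
      have hL : ((pvPairs N).foldl (pvBody N) matrix)[r] = matrix[r] := by
        exact Option.some.inj hhi
      rw [hL, List.getElem_append_right (by simp; omega)]
      simp only [List.length_map, List.length_range]
      rw [List.getElem_drop]
      congr 1
      omega

-- ===== VERDICT (by name: the statement is the Claim_ definition above) =====
theorem rotate_image_2_spec : Claim_equal_rotate_image_2 := by
  intro matrix _ hpre
  obtain ⟨hne, hlen, hrow⟩ := hpre
  unfold Spec_rotate_image_2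
  have hsh : pvShape matrix ((matrix.getD 0 []).length) := ⟨hlen, hrow⟩
  rw [pvA_eq_fold matrix _ rfl, pvAlt_eq_rotN matrix _ rfl hsh,
    pvFold_eq_rotN matrix _ hsh]
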